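-- pv_equiv track=rewrite | github.com/Slackness1/JobRadar | backend/scripts/build_tata_unmatched_priority_review.py | _resolve_unique_normalized_candidate
-- ===== SOURCE A (Python) =====
-- def _resolve_unique_normalized_candidate(normalized_name: str, canonical_by_normalized: dict[str, str]) -> str:
--     candidates = [
--         canonical_name
--         for candidate_normalized, canonical_name in canonical_by_normalized.items()
--         if normalized_name and (normalized_name in candidate_normalized or candidate_normalized in normalized_name)
--     ]
--     unique_candidates = sorted(set(candidates))
--     return unique_candidates[0] if len(unique_candidates) == 1 else ''
-- ===== SOURCE B (Python) =====
-- def _resolve_unique_normalized_candidate(normalized_name: str, canonical_by_normalized: dict[str, str]) -> str: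
--     if not normalized_name:
--         return ''
--     found = None
--     for candidate_normalized, canonical_name in canonical_by_normalized.items():
--         if normalized_name in candidate_normalized or candidate_normalized in normalized_name:
--             if found is None:
--                 found = canonical_name
--             elif canonical_name != found:
--                 return ''
--     return found if found is not None else ''
-- ===== Notes on version B (the rewrite author's own statement) =====
-- stated objective: simpler
-- what changed: Replaces build-list-then-sorted-set-then-index with a single pass keeping at most one candidate name in an Option accumulator, returning '' as soon as a second distinct canonical name appears; no list, set or sort is built.
import Mathlib
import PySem

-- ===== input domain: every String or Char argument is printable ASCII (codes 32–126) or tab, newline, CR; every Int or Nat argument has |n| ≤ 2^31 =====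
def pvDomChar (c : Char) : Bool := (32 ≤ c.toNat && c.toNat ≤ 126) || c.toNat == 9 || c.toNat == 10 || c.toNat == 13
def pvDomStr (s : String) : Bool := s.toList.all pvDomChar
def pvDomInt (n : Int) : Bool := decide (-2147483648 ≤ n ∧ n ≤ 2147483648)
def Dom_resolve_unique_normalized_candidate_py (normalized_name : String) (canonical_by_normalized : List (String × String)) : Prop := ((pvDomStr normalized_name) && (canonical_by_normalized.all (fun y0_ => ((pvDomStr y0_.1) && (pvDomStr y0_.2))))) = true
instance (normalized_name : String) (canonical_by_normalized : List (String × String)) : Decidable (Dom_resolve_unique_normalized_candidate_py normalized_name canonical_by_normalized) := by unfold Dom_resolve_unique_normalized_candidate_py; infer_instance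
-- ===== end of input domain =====

-- B replaces A's build-list / dedup-into-set / sort / index pipeline by a single pass with an
-- Option accumulator and an early '' exit on the second distinct canonical name (objective: simpler).

-- ===== PORT A =====
def resolve_unique_normalized_candidate_py (normalized_name : String) (canonical_by_normalized : List (String × String)) : String :=
  let candidates := canonical_by_normalized.foldl
    (fun acc p =>
      if (!(normalized_name == "")) && (PySem.Str.isIn normalized_name p.1 || PySem.Str.isIn p.1 normalized_name)
      then acc ++ [p.2] else acc) []
  let unique_candidates := PySem.List.sorted (PySem.Set.ofList candidates) (fun x => x)
  if unique_candidates.length = 1 then PySem.List.pyGetD unique_candidates 0 "" else ""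

-- ===== PORT B =====
-- the loop of Source B: 'found' is the Option accumulator, '' is returned on a second distinct name
def pvAltLoop (normalized_name : String) : List (String × String) → Option String → String
  | [], found => match found with | some f => f | none => ""
  | p :: rest, found =>
      if PySem.Str.isIn normalized_name p.1 || PySem.Str.isIn p.1 normalized_name then
        match found with
        | none => pvAltLoop normalized_name rest (some p.2)
        | some f => if p.2 = f then pvAltLoop normalized_name rest (some f) else ""
      else pvAltLoop normalized_name rest found

def resolve_unique_normalized_candidate_py_alt (normalized_name : String) (canonical_by_normalized : List (String × String)) : String :=
  if normalized_name = "" then ""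
  else pvAltLoop normalized_name canonical_by_normalized none

-- ===== PRECONDITION & SPEC =====
def Spec_resolve_unique_normalized_candidate_py (normalized_name : String) (canonical_by_normalized : List (String × String)) (out : String) : Prop := out = resolve_unique_normalized_candidate_py_alt normalized_name canonical_by_normalized
instance (normalized_name : String) (canonical_by_normalized : List (String × String)) (out : String) : Decidable (Spec_resolve_unique_normalized_candidate_py normalized_name canonical_by_normalized out) := by unfold Spec_resolve_unique_normalized_candidate_py; infer_instance

-- ===== CLAIM (what is proved, stated in full; the proofs are below) =====
def Claim_equal_resolve_unique_normalized_candidate_py : Prop := ∀ (normalized_name : String) (canonical_by_normalized : List (String × String)), Dom_resolve_unique_normalized_candidate_py normalized_name canonical_by_normalized → Spec_resolve_unique_normalized_candidate_py normalized_name canonical_by_normalized (resolve_unique_normalized_candidate_py normalized_name canonical_by_normalized)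

-- ===== LEMMAS AND PROOFS =====

-- the bidirectional-substring guard, shared by the proofs
def pvMatch (nn : String) (p : String × String) : Bool :=
  PySem.Str.isIn nn p.1 || PySem.Str.isIn p.1 nn

-- B's loop expressed over the list of matching canonical names only
def pvLoop2 : List String → Option String → String
  | [], found => match found with | some f => f | none => ""
  | c :: rest, none => pvLoop2 rest (some c)
  | c :: rest, some f => if c = f then pvLoop2 rest (some f) else ""

theorem pvAltLoop_eq_loop2 (nn : String) (d : List (String × String)) (found : Option String) :
    pvAltLoop nn d found = pvLoop2 ((d.filter (pvMatch nn)).map (·.2)) found := by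
  induction d generalizing found with
  | nil => rfl
  | cons p rest ih =>
    have hrfl : (PySem.Str.isIn nn p.1 || PySem.Str.isIn p.1 nn) = pvMatch nn p := rfl
    by_cases h : pvMatch nn p = true
    · cases found with
      | none =>
        simp only [pvAltLoop, hrfl, h, if_true, List.filter_cons, List.map_cons, pvLoop2, ih]
      | some f =>
        simp only [pvAltLoop, hrfl, h, if_true, List.filter_cons, List.map_cons, pvLoop2]
        by_cases hf : p.2 = f <;> simp [hf, ih]
    · simp only [pvAltLoop, hrfl, Bool.eq_false_iff.mpr h, if_false, List.filter_cons,
        Bool.false_eq_true, ih]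

theorem pvLoop2_some (cs : List String) (f : String) :
    pvLoop2 cs (some f) = if cs.all (· == f) then f else "" := by
  induction cs with
  | nil => rfl
  | cons c rest ih =>
    by_cases h : c = f
    · simp [pvLoop2, h, ih]
    · simp [pvLoop2, h]

theorem pvFoldl_add_of_subset {α : Type} [BEq α] [LawfulBEq α] (l : List α) (s : PySem.Set α)
    (h : ∀ x ∈ l, x ∈ s) : l.foldl PySem.Set.add s = s := by
  induction l generalizing s with
  | nil => rfl
  | cons x xs ih =>
    have hmem : x ∈ s := h x List.mem_cons_self
    have : PySem.Set.add s x = s := by simp [PySem.Set.add, hmem]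
    rw [List.foldl_cons, this]
    exact ih s (fun y hy => h y (by simp [hy]))

theorem pvA_side_eq_loop2 (cs : List String) :
    (if (PySem.List.sorted (PySem.Set.ofList cs) (fun x => x)).length = 1
     then PySem.List.pyGetD (PySem.List.sorted (PySem.Set.ofList cs) (fun x => x)) 0 "" else "")
    = pvLoop2 cs none := by
  cases cs with
  | nil => rfl
  | cons c rest =>
    rw [pvLoop2, pvLoop2_some]
    by_cases hall : rest.all (· == c) = true
    · -- every candidate equals c: the set is [c]
      have hset : PySem.Set.ofList (c :: rest) = [c] := by
        rw [PySem.Set.ofList_eq_foldl, List.foldl_cons]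
        have hadd : PySem.Set.add ([] : PySem.Set String) c = [c] := by
          simp [PySem.Set.add]
        rw [hadd]
        exact pvFoldl_add_of_subset rest [c] (by
          intro x hx
          have := List.all_eq_true.mp hall x hx
          simp at this; simp [this])
      have hsorted : PySem.List.sorted (PySem.Set.ofList (c :: rest)) (fun x => x) = [c] := by
        rw [hset]
        exact PySem.List.sorted_eq_of_perm_of_pairwise_lt [c] [c] (fun x => x) (List.Perm.refl _) (by simp)
      simp [hsorted, hall, PySem.List.pyGetD_zero_cons]
    · -- some candidate differs from c: the set has at least two elements
      obtain ⟨x, hxmem, hxne⟩ := by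
        simpa using (List.all_eq_true.not.mp hall)
      have hlen : (PySem.List.sorted (PySem.Set.ofList (c :: rest)) (fun x => x)).length ≠ 1 := by
        intro h1
        rw [PySem.List.length_sorted] at h1
        obtain ⟨y, hy⟩ := List.length_eq_one_iff.mp h1
        have hc : c ∈ PySem.Set.ofList (c :: rest) := (PySem.Set.mem_ofList _ _).2 (by simp)
        have hx : x ∈ PySem.Set.ofList (c :: rest) := (PySem.Set.mem_ofList _ _).2 (by simp [hxmem])
        rw [hy] at hc hx
        simp at hc hx
        exact hxne (hx.trans hc.symm)
      rw [if_neg hlen, if_neg hall]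

theorem pvMain (nn : String) (d : List (String × String)) :
    resolve_unique_normalized_candidate_py nn d = resolve_unique_normalized_candidate_py_alt nn d := by
  by_cases hnn : nn = ""
  · subst hnn
    simp [resolve_unique_normalized_candidate_py, resolve_unique_normalized_candidate_py_alt]
  · unfold resolve_unique_normalized_candidate_py resolve_unique_normalized_candidate_py_alt
    simp only [hnn]
    have hguard : (fun (acc : List String) (p : String × String) =>
        if (!(nn == "")) && (PySem.Str.isIn nn p.1 || PySem.Str.isIn p.1 nn) then acc ++ [p.2] else acc)
        = fun acc p => if pvMatch nn p then acc ++ [p.2] else acc := by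
      funext acc p
      simp [pvMatch, hnn]
    rw [hguard, PySem.List.foldl_append_if (pvMatch nn) (·.2) d []]
    simp only [List.nil_append]
    rw [pvAltLoop_eq_loop2]
    exact pvA_side_eq_loop2 _

-- ===== VERDICT (by name: the statement is the Claim_ definition above) =====
theorem resolve_unique_normalized_candidate_py_spec : Claim_equal_resolve_unique_normalized_candidate_py := by
  intro nn d _
  exact pvMain nn d
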